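-- pv_equiv track=rewrite | github.com/MrBrantCode/unitest_baseline | mut_generate/mist_train_taco/taco_9205/solution.py | find_longest_subsequence_with_lcm_constraint
-- ===== SOURCE A (Python) =====
-- def find_longest_subsequence_with_lcm_constraint(n, m, a):
--     from collections import Counter
--
--     m += 1
--     tmp = Counter((x for x in a if 1 < x < m))
--     num = [0] * m
--
--     for (x, v) in list(tmp.items()):
--         for i in range(x, m, x):
--             num[i] += v
--
--     lcm = max(list(range(m)), key=num.__getitem__)
--
--     if lcm:
--         tmp = {x for x in list(tmp.keys()) if not lcm % x}
--         tmp.add(1)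
--         subsequence_indices = [i for (i, x) in enumerate(a, 1) if x in tmp]
--     else:
--         (subsequence_indices, lcm) = ([i for (i, x) in enumerate(a, 1) if x == 1], 1)
--
--     return lcm, subsequence_indices
-- ===== SOURCE B (Python) =====
-- def find_longest_subsequence_with_lcm_constraint(n, m, a):
--     # Different decomposition: for each candidate value i, count the array
--     # elements dividing it by a direct scan (no Counter sieve, no num table),
--     # keeping a running first-wins argmax; then filter indices by a direct
--     # divisibility predicate instead of building a key set.
--     limit = m + 1
--     best = 0
--     best_cnt = 0
--     for i in range(1, limit):
--         cnt = 0
--         for x in a: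
--             if 1 < x < limit and i % x == 0:
--                 cnt += 1
--         if cnt > best_cnt:
--             best = i
--             best_cnt = cnt
--     if best == 0:
--         return 1, [k for k, x in enumerate(a, 1) if x == 1]
--     return best, [k for k, x in enumerate(a, 1)
--                   if x == 1 or (1 < x < limit and best % x == 0)]
-- ===== Notes on version B (the rewrite author's own statement) =====
-- stated objective: alternative
-- what changed: Replaces the Counter+sieve-over-multiples num table and max(range,key) with a per-candidate direct divisor count over the array and a running first-wins argmax, and replaces the divisor key-set with a direct divisibility predicate when selecting indices.
import Mathlib
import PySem

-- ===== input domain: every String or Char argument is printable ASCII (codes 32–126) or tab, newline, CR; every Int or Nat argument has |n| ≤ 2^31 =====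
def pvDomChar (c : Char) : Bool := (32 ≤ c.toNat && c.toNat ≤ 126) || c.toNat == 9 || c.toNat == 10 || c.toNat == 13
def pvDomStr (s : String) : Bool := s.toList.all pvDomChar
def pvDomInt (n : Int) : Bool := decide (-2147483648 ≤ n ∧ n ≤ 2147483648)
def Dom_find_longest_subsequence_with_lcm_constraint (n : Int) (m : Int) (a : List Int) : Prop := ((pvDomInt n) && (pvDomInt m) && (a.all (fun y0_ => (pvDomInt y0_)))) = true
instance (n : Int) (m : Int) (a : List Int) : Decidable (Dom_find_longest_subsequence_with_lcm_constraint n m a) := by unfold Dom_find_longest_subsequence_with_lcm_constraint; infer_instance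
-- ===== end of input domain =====

-- ===== PORT A =====
-- One line: B replaces A's Counter+sieve num table and max(range,key) by a per-candidate
-- divisor count with a running first-wins argmax (alternative decomposition, not faster).
-- sieve inner loop: for i in range(x, m, x): num[i] += v
-- num is held as an Array Int (Python's list: O(1) index/assign); indices i are the
-- range elements x, 2x, ..., all within 0 ≤ i < len(num), where setIfInBounds = Python's num[i] = …
def pvSieveStep (m1 : Int) (nm : Array Int) (xv : Int × Int) : Array Int :=
  (PySem.List.pyRange xv.1 m1 xv.1).foldl
    (fun nm2 i => nm2.setIfInBounds i.toNat (nm2.getD i.toNat 0 + xv.2)) nm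

def find_longest_subsequence_with_lcm_constraint (n : Int) (m : Int) (a : List Int) : Int × List Int :=
  let m1 := m + 1
  let tmp := PySem.Dict.counter (a.filter (fun x => decide (1 < x) && decide (x < m1)))
  let num := tmp.items.foldl (pvSieveStep m1) (Array.replicate m1.toNat 0)
  -- max(range(m), key=num.__getitem__); nonempty under Pre_, so .getD 0 is never the none
  -- case, and every index 0 ≤ i < len(num) is in range, so getD's default is never taken
  let lcm := (PySem.List.max? (PySem.List.pyRange 0 m1 1) (fun i => num.getD i.toNat 0)).getD 0
  if lcm ≠ 0 then
    let tmp2 := PySem.Set.add (PySem.Set.ofList (tmp.keys.filter (fun x => PySem.Int.mod lcm x == 0))) 1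
    (lcm, ((PySem.List.enumerate a 1).filter (fun p => PySem.Set.contains tmp2 p.2)).map (fun p => p.1))
  else
    (1, ((PySem.List.enumerate a 1).filter (fun p => p.2 == 1)).map (fun p => p.1))

-- ===== PORT B =====
-- cnt = sum over a of [1 < x < limit and i % x == 0]
def pvCount (limit : Int) (i : Int) (a : List Int) : Int :=
  a.foldl (fun cnt x =>
    if decide (1 < x) && decide (x < limit) && (PySem.Int.mod i x == 0) then cnt + 1 else cnt) 0

def find_longest_subsequence_with_lcm_constraint_alt (n : Int) (m : Int) (a : List Int) : Int × List Int :=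
  let limit := m + 1
  let st := (PySem.List.pyRange 1 limit 1).foldl
    (fun (s : Int × Int) i =>
      let cnt := pvCount limit i a
      if cnt > s.2 then (i, cnt) else s) (0, 0)
  if st.1 == 0 then
    (1, ((PySem.List.enumerate a 1).filter (fun p => p.2 == 1)).map (fun p => p.1))
  else
    (st.1, ((PySem.List.enumerate a 1).filter (fun p =>
        p.2 == 1 || (decide (1 < p.2) && decide (p.2 < limit) && (PySem.Int.mod st.1 p.2 == 0)))).map (fun p => p.1))

-- ===== PRECONDITION & SPEC =====
-- Pre_ excludes exactly m < 0, where A's max() over the empty range(m+1) raises ValueError.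
def Pre_find_longest_subsequence_with_lcm_constraint (n : Int) (m : Int) (a : List Int) : Prop := 0 ≤ m
instance (n : Int) (m : Int) (a : List Int) : Decidable (Pre_find_longest_subsequence_with_lcm_constraint n m a) := by unfold Pre_find_longest_subsequence_with_lcm_constraint; infer_instance
def pvWitness_find_longest_subsequence_with_lcm_constraint : Int × Int × List Int := (0, 3, [2, 3, 1])

def Spec_find_longest_subsequence_with_lcm_constraint (n : Int) (m : Int) (a : List Int) (out : Int × List Int) : Prop := out = find_longest_subsequence_with_lcm_constraint_alt n m a
instance (n : Int) (m : Int) (a : List Int) (out : Int × List Int) : Decidable (Spec_find_longest_subsequence_with_lcm_constraint n m a out) := by unfold Spec_find_longest_subsequence_with_lcm_constraint; infer_instance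

-- ===== CLAIM (what is proved, stated in full; the proofs are below) =====
def Claim_equal_find_longest_subsequence_with_lcm_constraint : Prop := ∀ (n : Int) (m : Int) (a : List Int), Dom_find_longest_subsequence_with_lcm_constraint n m a → Pre_find_longest_subsequence_with_lcm_constraint n m a → Spec_find_longest_subsequence_with_lcm_constraint n m a (find_longest_subsequence_with_lcm_constraint n m a)

-- ===== LEMMAS AND PROOFS =====

theorem pv_size_foldl_set (L : List Int) (nm : Array Int) (v : Int) :
    (L.foldl (fun nm2 i => nm2.setIfInBounds i.toNat (nm2.getD i.toNat 0 + v)) nm).size = nm.size := by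
  induction L generalizing nm with
  | nil => rfl
  | cons i L ih => rw [List.foldl_cons, ih, Array.size_setIfInBounds]

theorem pv_foldl_set_getD (L : List Int) (nm : Array Int) (v : Int) (j : Nat)
    (hnd : L.Nodup) (hnn : ∀ e ∈ L, 0 ≤ e) :
    (L.foldl (fun nm2 i => nm2.setIfInBounds i.toNat (nm2.getD i.toNat 0 + v)) nm).getD j 0
      = nm.getD j 0 + (if (j : Int) ∈ L ∧ j < nm.size then v else 0) := by
  induction L generalizing nm with
  | nil => simp
  | cons i L ih =>
    rw [List.foldl_cons]
    rw [ih _ hnd.of_cons (fun e he => hnn e (List.mem_cons_of_mem _ he))]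
    rw [Array.size_setIfInBounds]
    have hi0 : 0 ≤ i := hnn i (List.mem_cons_self)
    by_cases hij : i.toNat = j
    · have hiz : i = (j : Int) := by omega
      have hjL : (j : Int) ∉ L := by
        rw [← hiz]; exact (List.nodup_cons.mp hnd).1
      by_cases hlt : j < nm.size
      · have h2 : (nm.setIfInBounds i.toNat (nm.getD i.toNat 0 + v)).getD j 0 = nm.getD j 0 + v := by
          rw [hij]
          simp [Array.getD_eq_getD_getElem?, hlt]
        rw [h2]
        simp [hjL, hiz, hlt]
      · have hset : nm.setIfInBounds i.toNat (nm.getD i.toNat 0 + v) = nm := by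
          simp [Array.setIfInBounds]
          omega
        rw [hset]
        simp [hjL, hlt]
    · have hne : ((j:Int)) ≠ i := by omega
      have h2 : (nm.setIfInBounds i.toNat (nm.getD i.toNat 0 + v)).getD j 0 = nm.getD j 0 := by
        simp [Array.getD_eq_getD_getElem?, hij]
      rw [h2]
      simp [List.mem_cons, hne]

theorem pv_nodup_pyRange (x b : Int) (hx : 0 < x) : (PySem.List.pyRange x b x).Nodup := by
  rw [PySem.List.pyRange_of_pos _ _ hx]
  refine (List.nodup_range).map ?_
  intro p q h
  simp only at h
  have h2 : x * (p:Int) = x * q := by omega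
  exact Nat.cast_injective (mul_left_cancel₀ (by omega) h2)

theorem pv_sieve_getD (items : List (Int × Int)) (m1 : Int) (num0 : Array Int) (j : Nat)
    (hk : ∀ xv ∈ items, 2 ≤ xv.1) :
    (items.foldl (pvSieveStep m1) num0).getD j 0
      = num0.getD j 0 +
        (items.map (fun xv => if (j : Int) ∈ PySem.List.pyRange xv.1 m1 xv.1 ∧ j < num0.size then xv.2 else 0)).sum := by
  induction items generalizing num0 with
  | nil => simp
  | cons xv items ih =>
    have hx : 2 ≤ xv.1 := hk xv List.mem_cons_self
    have hx0 : (0:Int) < xv.1 := by omega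
    rw [List.foldl_cons]
    rw [ih _ (fun y hy => hk y (List.mem_cons_of_mem _ hy))]
    have hlen : (pvSieveStep m1 num0 xv).size = num0.size := pv_size_foldl_set _ _ _
    have hget : (pvSieveStep m1 num0 xv).getD j 0
        = num0.getD j 0 + (if (j : Int) ∈ PySem.List.pyRange xv.1 m1 xv.1 ∧ j < num0.size then xv.2 else 0) :=
      pv_foldl_set_getD _ _ _ _ (pv_nodup_pyRange _ _ hx0)
        (fun e he => by
          have := (PySem.List.mem_pyRange_iff_of_pos hx0 e).mp he
          omega)
    rw [hlen, hget, List.map_cons, List.sum_cons]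
    ring

theorem pv_sum_ite_eq_single (S : List Int) (y : Int) (hS : S.Nodup) (hy : y ∈ S) (c : Int) :
    (S.map (fun k => if k = y then c else 0)).sum = c := by
  induction S with
  | nil => simp at hy
  | cons k S ih =>
    rw [List.map_cons, List.sum_cons]
    rcases List.mem_cons.mp hy with h | h
    · subst h
      have hnotin : y ∉ S := (List.nodup_cons.mp hS).1
      have hz : (S.map (fun k => if k = y then c else 0)).sum = 0 := by
        apply List.sum_eq_zero
        intro x hx
        rcases List.mem_map.mp hx with ⟨z, hz, rfl⟩
        have hne : ¬ z = y := fun he => hnotin (he ▸ hz)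
        simp [hne]
      rw [hz]; simp
    · have hk : k ≠ y := by rintro rfl; exact (List.nodup_cons.mp hS).1 h
      rw [if_neg hk, ih (List.nodup_cons.mp hS).2 h]; ring

theorem pv_sum_count (S : List Int) (fl : List Int) (p : Int → Bool)
    (hS : S.Nodup) (hmem : ∀ y ∈ fl, y ∈ S) :
    (S.map (fun k => if p k then (fl.count k : Int) else 0)).sum = (fl.countP p : Int) := by
  induction fl with
  | nil => simp
  | cons y fl ih =>
    have step : ∀ k : Int, (if p k then ((y :: fl).count k : Int) else 0)
        = (if p k then (fl.count k : Int) else 0) + (if p y then (if k = y then (1:Int) else 0) else 0) := by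
      intro k
      by_cases hpk : p k
      · by_cases hky : k = y
        · subst hky; simp [hpk, List.count_cons_self]
        · have hyk : ¬ y = k := fun h => hky h.symm
          simp [hpk, hky, hyk]
      · by_cases hky : k = y
        · subst hky; simp [hpk]
        · simp [hpk, hky]
    rw [List.map_congr_left (fun k _ => step k)]
    rw [List.sum_map_add]
    rw [ih (fun z hz => hmem z (List.mem_cons_of_mem _ hz))]
    by_cases hpy : p y
    · simp only [hpy, if_true]
      rw [pv_sum_ite_eq_single S y hS (hmem y List.mem_cons_self) 1]
      simp [hpy]
    · simp only [hpy]
      simp [hpy]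

theorem pv_max_eq_scan (f : Int → Int) (t : List Int) (b c : Int) (hc : c = f b) :
    PySem.List.max? (b :: t) f
      = some ((t.foldl (fun (s : Int × Int) i => if f i > s.2 then (i, f i) else s) (b, c)).1) := by
  induction t generalizing b c with
  | nil => simp [PySem.List.max?]
  | cons i t ih =>
    subst hc
    simp only [PySem.List.max?, List.foldl_cons] at *
    by_cases h : f b < f i
    · rw [if_pos h, if_pos (by exact h)]
      exact ih i (f i) rfl
    · rw [if_neg h, if_neg (by exact h)]
      exact ih b (f b) rfl

theorem pv_num_eq_count (m : Int) (a : List Int) (j : Nat) (hm : 0 ≤ m)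
    (hj : (j : Int) < m + 1) :
    ((PySem.Dict.counter (a.filter (fun x => decide (1 < x) && decide (x < m + 1)))).items.foldl
        (pvSieveStep (m + 1)) (Array.replicate (m + 1).toNat 0)).getD j 0
      = if j = 0 then 0 else pvCount (m + 1) (j : Int) a := by
  set m1 : Int := m + 1 with hm1
  set fl : List Int := a.filter (fun x => decide (1 < x) && decide (x < m1)) with hfl
  have hflmem : ∀ x ∈ fl, 1 < x ∧ x < m1 := by
    intro x hx
    have := List.mem_filter.mp hx
    simpa using this.2
  have hk : ∀ xv ∈ (PySem.Dict.counter fl).items, 2 ≤ xv.1 := by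
    intro xv hxv
    have hkmem : xv.1 ∈ (PySem.Dict.counter fl).keys := List.mem_map_of_mem hxv
    rw [PySem.Dict.keys_counter] at hkmem
    have h2 := hflmem _ ((PySem.Set.mem_ofList fl xv.1).mp hkmem)
    omega
  rw [pv_sieve_getD _ _ _ _ hk]
  have hrep : (Array.replicate m1.toNat (0:Int)).getD j 0 = 0 := by
    simp [Array.getD_eq_getD_getElem?, Array.getElem?_replicate]
    split <;> rfl
  have hlen : j < (Array.replicate m1.toNat (0:Int)).size := by
    simp [Array.size_replicate]; omega
  rw [hrep]
  have hmemiff : ∀ x : Int, 2 ≤ x →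
      (((j : Int) ∈ PySem.List.pyRange x m1 x ∧ j < (Array.replicate m1.toNat (0:Int)).size)
        ↔ (1 ≤ j ∧ x ∣ (j : Int))) := by
    intro x hx
    rw [PySem.List.mem_pyRange_iff_of_pos (by omega)]
    constructor
    · rintro ⟨⟨h1, h2, h3⟩, h4⟩
      refine ⟨by omega, ?_⟩
      have : x ∣ ((j : Int) - x) + x := Dvd.dvd.add h3 dvd_rfl
      simpa using this
    · rintro ⟨h1, h2⟩
      have hxj : x ≤ (j : Int) := Int.le_of_dvd (by exact_mod_cast h1) h2
      exact ⟨⟨hxj, hj, (Dvd.dvd.sub h2 dvd_rfl)⟩, hlen⟩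
  by_cases hj0 : j = 0
  · subst hj0
    rw [if_pos rfl]
    have : ∀ xv ∈ (PySem.Dict.counter fl).items,
        (if ((0:Nat) : Int) ∈ PySem.List.pyRange xv.1 m1 xv.1 ∧ (0:Nat) < (Array.replicate m1.toNat (0:Int)).size then xv.2 else 0) = 0 := by
      intro xv hxv
      rw [if_neg]
      intro hcon
      have := (hmemiff xv.1 (hk xv hxv)).mp hcon
      omega
    rw [List.map_congr_left this]
    simp
  · rw [if_neg hj0]
    have hj1 : 1 ≤ j := Nat.one_le_iff_ne_zero.mpr hj0
    have hstep : ∀ xv ∈ (PySem.Dict.counter fl).items,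
        (if ((j:Nat) : Int) ∈ PySem.List.pyRange xv.1 m1 xv.1 ∧ j < (Array.replicate m1.toNat (0:Int)).size then xv.2 else 0)
          = (if xv.1 ∣ (j : Int) then xv.2 else 0) := by
      intro xv hxv
      by_cases hd : xv.1 ∣ (j : Int)
      · rw [if_pos ((hmemiff xv.1 (hk xv hxv)).mpr ⟨hj1, hd⟩), if_pos hd]
      · rw [if_neg (fun hcon => hd ((hmemiff xv.1 (hk xv hxv)).mp hcon).2), if_neg hd]
    rw [List.map_congr_left hstep]
    rw [PySem.Dict.items_counter]
    rw [List.map_map]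
    have : ((fun xv : Int × Int => if xv.1 ∣ (j:Int) then xv.2 else 0) ∘ (fun k : Int => (k, (fl.count k : Int))))
        = (fun k : Int => if (fun x => decide (x ∣ (j:Int))) k then (fl.count k : Int) else 0) := by
      funext k; by_cases h : k ∣ (j:Int) <;> simp [h]
    rw [this]
    rw [pv_sum_count _ _ _ (PySem.Set.nodup_ofList fl) (fun y hy => (PySem.Set.mem_ofList fl y).mpr hy)]
    -- now relate countP over fl with pvCount
    unfold pvCount
    rw [PySem.List.foldl_if_add_one]
    rw [hfl, List.countP_filter]
    have hcp : List.countP (fun x => decide (x ∣ (j:Int)) && (decide (1 < x) && decide (x < m1))) a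
        = List.countP (fun x => decide (1 < x) && decide (x < m1) && (PySem.Int.mod (↑j) x == 0)) a := by
      apply List.countP_congr
      intro x hx
      simp only [Bool.and_eq_true, decide_eq_true_eq, beq_iff_eq, PySem.Int.mod_eq_zero_iff_dvd]
      tauto
    rw [hcp]

-- ===== VERDICT (by name: the statement is the Claim_ definition above) =====
theorem find_longest_subsequence_with_lcm_constraint_spec : Claim_equal_find_longest_subsequence_with_lcm_constraint := by
  intro n m a _ hpre
  unfold Spec_find_longest_subsequence_with_lcm_constraint
  have hm : 0 ≤ m := hpre
  unfold find_longest_subsequence_with_lcm_constraint find_longest_subsequence_with_lcm_constraint_alt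
  simp only []
  set m1 : Int := m + 1 with hm1
  set tmp := PySem.Dict.counter (a.filter (fun x => decide (1 < x) && decide (x < m1))) with htmp
  set num := tmp.items.foldl (pvSieveStep m1) (Array.replicate m1.toNat 0) with hnum
  set f : Int → Int := fun i => num.getD i.toNat 0 with hf
  -- pointwise equality of keys on range 1..m1
  have hpt : ∀ i ∈ PySem.List.pyRange 1 m1 1, f i = pvCount m1 i a := by
    intro i hi
    have hmem := (PySem.List.mem_pyRange_one).mp hi
    have h0 : 0 ≤ i := by omega
    have hjint : ((i.toNat : Int)) = i := by omega
    rw [hf]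
    simp only
    rw [hnum, htmp, hm1]
    rw [pv_num_eq_count m a i.toNat hm (by omega)]
    rw [if_neg (by omega)]
    rw [hjint]
  have hf0 : f 0 = 0 := by
    rw [hf]
    simp only
    rw [hnum, htmp, hm1]
    rw [pv_num_eq_count m a ((0:Int).toNat) hm (by simp; omega)]
    simp
  -- the argmax equals B's scan
  have hsplit : PySem.List.pyRange 0 m1 1 = 0 :: PySem.List.pyRange 1 m1 1 := by
    have := PySem.List.pyRange_one_cons (a := 0) (b := m1) (by omega)
    simpa using this
  have hmax : (PySem.List.max? (PySem.List.pyRange 0 m1 1) f).getD 0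
      = ((PySem.List.pyRange 1 m1 1).foldl
          (fun (s : Int × Int) i =>
            let cnt := pvCount m1 i a
            if cnt > s.2 then (i, cnt) else s) (0, 0)).1 := by
    rw [hsplit, pv_max_eq_scan f _ 0 0 hf0.symm]
    rw [Option.getD_some]
    congr 1
    apply PySem.List.foldl_congr_mem
    intro s i hi
    simp only
    rw [hpt i hi]
  set st := (PySem.List.pyRange 1 m1 1).foldl
      (fun (s : Int × Int) i =>
        let cnt := pvCount m1 i a
        if cnt > s.2 then (i, cnt) else s) (0, 0) with hst
  rw [hmax]
  by_cases hz : st.1 = 0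
  · rw [if_neg (by simpa using hz), if_pos (by simpa using hz)]
  · rw [if_pos (by simpa using hz), if_neg (by simpa using hz)]
    refine Prod.ext rfl ?_
    simp only
    congr 1
    apply List.filter_congr
    intro p hp
    -- p.2 ∈ a
    have hpa : p.2 ∈ a := by
      rcases (PySem.List.mem_enumerate_iff a 1 p).mp hp with ⟨k, hk, rfl⟩
      exact List.getElem_mem hk
    rw [Bool.eq_iff_iff]
    simp only [PySem.Set.contains, List.contains_iff_mem]
    rw [PySem.Set.mem_add]
    rw [PySem.Set.mem_ofList]
    rw [List.mem_filter]
    rw [PySem.Dict.keys_counter, PySem.Set.mem_ofList, List.mem_filter]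
    simp only [Bool.or_eq_true, Bool.and_eq_true, decide_eq_true_eq, beq_iff_eq,
      PySem.Int.mod_eq_zero_iff_dvd]
    tauto
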